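-- pv_equiv track=rewrite | github.com/stellalisy/silver-dataset | translator.py | process_tags
-- ===== SOURCE A (Python) =====
-- def process_tags(tags):
--     start, end = [], []
--     curr, phr_len, curr_tag = 0, 0, 0
--     while curr < len(tags):
--         if tags[curr] % 2 == 1:
--             if phr_len > 0:
--                 end[-1] = curr_tag
--                 phr_len = 0
--             curr_tag = tags[curr]
--             start.append(curr_tag)
--             end.append(0)
--             phr_len += 1
--             curr += 1
--         elif tags[curr] == 0:
--             if phr_len > 0: # end of an NER phrase
--                 end[-1] = curr_tag
--                 phr_len = 0
--             start.append(0)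
--             end.append(0)
--             curr += 1
--         elif phr_len == 0:
--             curr_tag = tags[curr] - 1
--             start.append(curr_tag)
--             end.append(0)
--             phr_len += 1
--             curr += 1
--         else:
--             start.append(0)
--             end.append(0)
--             phr_len += 1
--             curr += 1
--     if phr_len > 0:
--         end[-1] = curr_tag
--     return start, end
-- ===== SOURCE B (Python) =====
-- def process_tags(tags):
--     # Single forward pass with one-token lookahead: end markers are written
--     # directly (a phrase ends where the NEXT tag is odd or 0, or at the list
--     # end) instead of back-patching end[-1] later.
--     start, end = [], []
--     open_, ct = False, 0
--     for t, nxt in zip(tags, tags[1:] + [0]):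
--         sv = 0
--         if t % 2 == 1:
--             open_, ct, sv = True, t, t
--         elif t == 0:
--             open_ = False
--         elif not open_:
--             open_, ct, sv = True, t - 1, t - 1
--         closes = (nxt % 2 == 1) or (nxt == 0)
--         start.append(sv)
--         end.append(ct if (open_ and closes) else 0)
--     return start, end
-- ===== Notes on version B (the rewrite author's own statement) =====
-- stated objective: alternative
-- what changed: B replaces A's append-and-backpatch pass (phrase-length counter, end[-1] mutated when a phrase closes) by a single forward pass with one-token lookahead (each tag zipped with its successor, a sentinel zero at the end) that writes every end marker directly and never mutates earlier entries.
import Mathlib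
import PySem

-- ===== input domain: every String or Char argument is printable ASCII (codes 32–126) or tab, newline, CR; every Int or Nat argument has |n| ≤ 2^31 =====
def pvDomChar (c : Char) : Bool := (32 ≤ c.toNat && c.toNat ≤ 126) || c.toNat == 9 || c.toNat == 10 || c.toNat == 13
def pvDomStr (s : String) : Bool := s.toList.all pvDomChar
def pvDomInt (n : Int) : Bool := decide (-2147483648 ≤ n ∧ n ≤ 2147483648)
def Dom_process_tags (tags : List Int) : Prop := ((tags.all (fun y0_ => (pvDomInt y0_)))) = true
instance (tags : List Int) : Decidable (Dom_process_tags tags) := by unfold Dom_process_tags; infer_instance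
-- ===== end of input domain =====

-- B replaces A's append-and-backpatch single pass by a forward pass with one-token lookahead (no mutation of earlier entries); objective: alternative.


-- ===== PORT A =====
-- end[-1] = v on a nonempty list (the port only reaches it with phr_len > 0, when end is nonempty, exactly as Python)
def pvSetLast (l : List Int) (v : Int) : List Int := l.set (l.length - 1) v

-- the while-loop over curr, as structural recursion on the remaining suffix of tags
def pvLoopA : List Int → List Int → List Int → Int → Int → List Int × List Int
  | [], start, endl, pl, ct => if pl > 0 then (start, pvSetLast endl ct) else (start, endl)
  | t :: rest, start, endl, pl, ct =>
    if PySem.Int.mod t 2 == 1 then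
      pvLoopA rest (start ++ [t]) ((if pl > 0 then pvSetLast endl ct else endl) ++ [0]) 1 t
    else if t == 0 then
      pvLoopA rest (start ++ [0]) ((if pl > 0 then pvSetLast endl ct else endl) ++ [0]) 0 ct
    else if pl == 0 then
      pvLoopA rest (start ++ [t - 1]) (endl ++ [0]) 1 (t - 1)
    else
      pvLoopA rest (start ++ [0]) (endl ++ [0]) (pl + 1) ct

def process_tags (tags : List Int) : List Int × List Int := pvLoopA tags [] [] 0 0

-- ===== PORT B =====
-- the for-loop over zip(tags, tags[1:] + [0]); tags[1:] is tags.drop 1 (exact: nonneg unit-step slice)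
def pvLoopB : List (Int × Int) → Bool → Int → List Int → List Int → List Int × List Int
  | [], _, _, start, endl => (start, endl)
  | (t, nxt) :: rest, op, ct, start, endl =>
    let s := if PySem.Int.mod t 2 == 1 then (true, t, t)
             else if t == 0 then (false, ct, (0:Int))
             else if !op then (true, t - 1, t - 1)
             else (op, ct, 0)
    let closes := PySem.Int.mod nxt 2 == 1 || nxt == 0
    pvLoopB rest s.1 s.2.1 (start ++ [s.2.2]) (endl ++ [if s.1 && closes then s.2.1 else 0])

def process_tags_alt (tags : List Int) : List Int × List Int :=
  pvLoopB (tags.zip (tags.drop 1 ++ [0])) false 0 [] []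

-- ===== PRECONDITION & SPEC =====
def Spec_process_tags (tags : List Int) (out : List Int × List Int) : Prop := out = process_tags_alt tags
instance (tags : List Int) (out : List Int × List Int) : Decidable (Spec_process_tags tags out) := by unfold Spec_process_tags; infer_instance

-- ===== CLAIM (what is proved, stated in full; the proofs are below) =====
def Claim_equal_process_tags : Prop := ∀ (tags : List Int), Dom_process_tags tags → Spec_process_tags tags (process_tags tags)

-- ===== LEMMAS AND PROOFS =====
-- whether the next position (head of the remaining suffix, or the list end) closes an open phrase
def pvCloses (rest : List Int) : Bool :=
  match rest with
  | [] => true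
  | r :: _ => PySem.Int.mod r 2 == 1 || r == 0

-- common functional characterisation of both loops: per-position start/end values with lookahead
def pvF : List Int → Bool → Int → List Int × List Int
  | [], _, _ => ([], [])
  | t :: rest, op, ct =>
    let s := if PySem.Int.mod t 2 == 1 then (true, t, t)
             else if t == 0 then (false, ct, (0:Int))
             else if !op then (true, t - 1, t - 1)
             else (op, ct, 0)
    let p := pvF rest s.1 s.2.1
    (s.2.2 :: p.1, (if s.1 && pvCloses rest then s.2.1 else 0) :: p.2)

lemma pvSetLast_append (l : List Int) (x v : Int) : pvSetLast (l ++ [x]) v = l ++ [v] := by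
  simp [pvSetLast]

lemma pvLoopA_F (rest : List Int) :
    (∀ (start endp : List Int) (pl ct : Int), 0 < pl →
      pvLoopA rest start (endp ++ [0]) pl ct =
        (start ++ (pvF rest true ct).1,
         endp ++ (if pvCloses rest then ct else 0) :: (pvF rest true ct).2))
    ∧ (∀ (start endl : List Int) (ct : Int),
      pvLoopA rest start endl 0 ct =
        (start ++ (pvF rest false ct).1, endl ++ (pvF rest false ct).2)) := by
  induction rest with
  | nil =>
    constructor
    · intro start endp pl ct hpl
      simp [pvLoopA, pvF, pvCloses, pvSetLast_append, hpl]
    · intro start endl ct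
      simp [pvLoopA, pvF]
  | cons t rs ih =>
    obtain ⟨ih1, ih2⟩ := ih
    have hm : PySem.Int.mod t 2 = t % 2 := PySem.Int.mod_eq_emod_of_pos (by norm_num)
    constructor
    · intro start endp pl ct hpl
      by_cases hodd : t % 2 = 1
      · simp only [pvLoopA, hm, hodd, beq_self_eq_true, if_true, if_pos hpl, pvSetLast_append]
        rw [show endp ++ [ct] ++ [(0:Int)] = (endp ++ [ct]) ++ [0] by simp,
            ih1 (start ++ [t]) (endp ++ [ct]) 1 t (by norm_num)]
        simp [pvF, pvCloses, hm, hodd]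
      · by_cases h0 : t = 0
        · simp only [pvLoopA, hm, hodd, h0, if_pos hpl, pvSetLast_append]
          norm_num
          rw [show endp ++ [ct, (0:Int)] = (endp ++ [ct]) ++ [0] by simp,
              ih2 (start ++ [0]) ((endp ++ [ct]) ++ [0]) ct]
          simp [pvF, pvCloses, hm, hodd, h0]
        · have hpl0 : ¬ (pl == 0) = true := by simp; omega
          simp only [pvLoopA, hm, hodd, h0, hpl0]
          norm_num [hodd, h0]
          rw [show endp ++ [(0:Int), 0] = (endp ++ [0]) ++ [0] by simp,
              ih1 (start ++ [0]) (endp ++ [0]) (pl + 1) ct (by omega)]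
          simp [pvF, pvCloses, hm, hodd, h0]
    · intro start endl ct
      by_cases hodd : t % 2 = 1
      · simp only [pvLoopA, hm, hodd, beq_self_eq_true, if_true]
        rw [show (if (0:Int) > 0 then pvSetLast endl ct else endl) ++ [(0:Int)] = endl ++ [0] by norm_num,
            ih1 (start ++ [t]) endl 1 t (by norm_num)]
        simp [pvF, pvCloses, hm, hodd]
      · by_cases h0 : t = 0
        · simp only [pvLoopA, hm, hodd, h0]
          norm_num
          rw [ih2 (start ++ [0]) (endl ++ [0]) ct]
          simp [pvF, pvCloses, hm, hodd, h0]
        · simp only [pvLoopA, hm, hodd, h0]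
          norm_num [hodd, h0]
          rw [ih1 (start ++ [t - 1]) endl 1 (t - 1) (by norm_num)]
          simp [pvF, pvCloses, hm, hodd, h0]

lemma pvLoopB_F (rest : List Int) :
    ∀ (op : Bool) (ct : Int) (start endl : List Int),
      pvLoopB (rest.zip (rest.drop 1 ++ [0])) op ct start endl =
        (start ++ (pvF rest op ct).1, endl ++ (pvF rest op ct).2) := by
  induction rest with
  | nil => intro op ct start endl; simp [pvLoopB, pvF]
  | cons t rs ih =>
    intro op ct start endl
    cases rs with
    | nil => simp [pvLoopB, pvF, pvCloses, PySem.Int.mod]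
    | cons r rs' =>
      have h : rs' ++ [(0:Int)] = List.drop 1 (r :: rs') ++ [0] := by simp
      simp only [List.drop_succ_cons, List.drop_zero, List.cons_append, List.zip_cons_cons,
        pvLoopB]
      rw [h, ih]
      simp [pvF, pvCloses]

lemma process_tags_eq (tags : List Int) : process_tags tags = process_tags_alt tags := by
  rw [process_tags, process_tags_alt, (pvLoopA_F tags).2 [] [] 0, pvLoopB_F tags false 0 [] []]

-- ===== VERDICT (by name: the statement is the Claim_ definition above) =====
theorem process_tags_spec : Claim_equal_process_tags := by
  intro tags _
  unfold Spec_process_tags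
  exact process_tags_eq tags
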